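-- pv_equiv track=rewrite | github.com/tambourine666/MergeVLM | utils/extract_ans.py | synthesize_program_my
-- ===== SOURCE A (Python) =====
-- def synthesize_program_my(result: str, prefix: str) -> str:
--     program = prefix
--     program_cand = prefix
--
--     count = 0
--     for i, line in enumerate(result.split('\n')):
--         if line.strip(' ') in prefix:
--             continue
--         if count == 0:
--             program += line + '\n'
--         else:
--             if line.startswith('    '):
--                 program += line + '\n'
--             else:
--                 break
--             if line.startswith('    return '):
--                 break
--         count += 1
--
--     count = 0
--     for i, line in enumerate(result.split('\n')):
--         if line.strip(' ') in prefix: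
--             continue
--
--         if line.startswith('    '):
--             program_cand += line + '\n'
--         else:
--             # break
--             line = '    ' + line
--             program_cand += line + '\n'
--         if line.startswith('    return '):
--             break
--         count += 1
--
--     program += 'ans = solver()'
--     program = program.replace(' [/INST]', '    # [/INST]')
--     program_cand += 'ans = solver()'
--     program_cand = program_cand.replace(' [/INST]', '    # [/INST]')
--
--     return program, program_cand
-- ===== SOURCE B (Python) =====
-- def synthesize_program_my(result: str, prefix: str) -> str:
--     prog_lines = []
--     cand_lines = []
--     prog_started = False
--     prog_done = False
--     cand_done = False
--     for line in result.split('\n'):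
--         if line.strip(' ') in prefix:
--             continue
--         if not prog_done:
--             if not prog_started:
--                 prog_lines.append(line)
--                 prog_started = True
--             elif line.startswith('    '):
--                 prog_lines.append(line)
--                 prog_done = line.startswith('    return ')
--             else:
--                 prog_done = True
--         if not cand_done:
--             cline = line if line.startswith('    ') else '    ' + line
--             cand_lines.append(cline)
--             cand_done = cline.startswith('    return ')
--     program = prefix + ''.join(l + '\n' for l in prog_lines) + 'ans = solver()'
--     program_cand = prefix + ''.join(l + '\n' for l in cand_lines) + 'ans = solver()'
--     return (program.replace(' [/INST]', '    # [/INST]'),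
--             program_cand.replace(' [/INST]', '    # [/INST]'))
-- ===== Notes on version B (the rewrite author's own statement) =====
-- stated objective: alternative
-- what changed: The two separate loops over result.split('\n') (each with its own early break) are fused into one pass that updates both accumulators per line under independent done-flags, collecting lines into lists joined once at the end instead of repeated string concatenation.
import Mathlib
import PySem

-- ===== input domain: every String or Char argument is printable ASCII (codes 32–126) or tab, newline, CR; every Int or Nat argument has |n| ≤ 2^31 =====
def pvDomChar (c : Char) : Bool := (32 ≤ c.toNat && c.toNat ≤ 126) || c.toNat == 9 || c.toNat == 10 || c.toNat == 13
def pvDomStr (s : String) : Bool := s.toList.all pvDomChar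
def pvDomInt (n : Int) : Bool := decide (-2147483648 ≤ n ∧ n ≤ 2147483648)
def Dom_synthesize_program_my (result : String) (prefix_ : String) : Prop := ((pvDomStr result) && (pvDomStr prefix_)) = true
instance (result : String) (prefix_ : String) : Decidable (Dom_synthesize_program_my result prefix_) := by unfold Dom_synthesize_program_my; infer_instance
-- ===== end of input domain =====

-- B fuses A's two line loops into one pass with independent done-flags, collecting lines
-- into lists joined once at the end (alternative decomposition, same cost).


-- ===== PORT A =====
-- Loop 1 of A: state = (program, count, done); 'done' models the loop having broken out.
def pvA1step (pfxT : List Char) (st : List Char × Nat × Bool) (line : List Char) :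
    List Char × Nat × Bool :=
  if st.2.2 then st
  else if PySem.Chars.isIn (PySem.Chars.stripChars line [' ']) pfxT then st
  else if st.2.1 == 0 then (st.1 ++ line ++ ['\n'], st.2.1 + 1, false)
  else if PySem.Chars.startswith line "    ".toList then
    (st.1 ++ line ++ ['\n'],
     if PySem.Chars.startswith line "    return ".toList then st.2.1 else st.2.1 + 1,
     PySem.Chars.startswith line "    return ".toList)
  else (st.1, st.2.1, true)

-- Loop 2 of A: state = (program_cand, done).
def pvA2step (pfxT : List Char) (st : List Char × Bool) (line : List Char) :
    List Char × Bool :=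
  if st.2 then st
  else if PySem.Chars.isIn (PySem.Chars.stripChars line [' ']) pfxT then st
  else
    let line' := if PySem.Chars.startswith line "    ".toList then line
                 else "    ".toList ++ line
    (st.1 ++ line' ++ ['\n'], PySem.Chars.startswith line' "    return ".toList)

def synthesize_program_my (result : String) (prefix_ : String) : String × String :=
  let lines := PySem.Chars.splitOn result.toList ['\n']
  let s1 := lines.foldl (pvA1step prefix_.toList) (prefix_.toList, 0, false)
  let s2 := lines.foldl (pvA2step prefix_.toList) (prefix_.toList, false)
  let program := PySem.Chars.replace (s1.1 ++ "ans = solver()".toList)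
      " [/INST]".toList "    # [/INST]".toList
  let cand := PySem.Chars.replace (s2.1 ++ "ans = solver()".toList)
      " [/INST]".toList "    # [/INST]".toList
  (String.ofList program, String.ofList cand)

-- ===== PORT B =====
-- program side of B's fused loop: state = (prog_lines, prog_started, prog_done)
def pvBprogStep (st : List (List Char) × Bool × Bool) (line : List Char) :
    List (List Char) × Bool × Bool :=
  if st.2.2 then st
  else if !st.2.1 then (st.1 ++ [line], true, false)
  else if PySem.Chars.startswith line "    ".toList then
    (st.1 ++ [line], st.2.1, PySem.Chars.startswith line "    return ".toList)
  else (st.1, st.2.1, true)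

-- cand side of B's fused loop: state = (cand_lines, cand_done)
def pvBcandStep (st : List (List Char) × Bool) (line : List Char) :
    List (List Char) × Bool :=
  if st.2 then st
  else
    let cline := if PySem.Chars.startswith line "    ".toList then line
                 else "    ".toList ++ line
    (st.1 ++ [cline], PySem.Chars.startswith cline "    return ".toList)

def pvBstep (pfxT : List Char)
    (st : List (List Char) × Bool × Bool × List (List Char) × Bool) (line : List Char) :
    List (List Char) × Bool × Bool × List (List Char) × Bool :=
  if PySem.Chars.isIn (PySem.Chars.stripChars line [' ']) pfxT then st
  else
    let p := pvBprogStep (st.1, st.2.1, st.2.2.1) line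
    let c := pvBcandStep (st.2.2.2.1, st.2.2.2.2) line
    (p.1, p.2.1, p.2.2, c.1, c.2)

def synthesize_program_my_alt (result : String) (prefix_ : String) : String × String :=
  let fin := (PySem.Chars.splitOn result.toList ['\n']).foldl
      (pvBstep prefix_.toList) ([], false, false, [], false)
  let program := prefix_.toList ++ fin.1.flatMap (· ++ ['\n']) ++ "ans = solver()".toList
  let cand := prefix_.toList ++ fin.2.2.2.1.flatMap (· ++ ['\n']) ++ "ans = solver()".toList
  (String.ofList (PySem.Chars.replace program " [/INST]".toList "    # [/INST]".toList),
   String.ofList (PySem.Chars.replace cand " [/INST]".toList "    # [/INST]".toList))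

-- ===== PRECONDITION & SPEC =====
def Spec_synthesize_program_my (result : String) (prefix_ : String) (out : String × String) : Prop := out = synthesize_program_my_alt result prefix_
instance (result : String) (prefix_ : String) (out : String × String) : Decidable (Spec_synthesize_program_my result prefix_ out) := by unfold Spec_synthesize_program_my; infer_instance

-- ===== CLAIM (what is proved, stated in full; the proofs are below) =====
def Claim_equal_synthesize_program_my : Prop := ∀ (result : String) (prefix_ : String), Dom_synthesize_program_my result prefix_ → Spec_synthesize_program_my result prefix_ (synthesize_program_my result prefix_)

-- ===== LEMMAS AND PROOFS =====

-- invariant tying A's two folds to B's fused fold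
lemma pv_fold_eq (pfxT : List Char) (lines : List (List Char))
    (pl cl : List (List Char)) (ps pd cd : Bool) (c : Nat)
    (hc : (c == 0) = !ps) :
    (lines.foldl (pvA1step pfxT) (pfxT ++ pl.flatMap (· ++ ['\n']), c, pd)).1
      = pfxT ++ ((lines.foldl (pvBstep pfxT) (pl, ps, pd, cl, cd)).1).flatMap (· ++ ['\n'])
    ∧ (lines.foldl (pvA2step pfxT) (pfxT ++ cl.flatMap (· ++ ['\n']), cd)).1
      = pfxT ++ ((lines.foldl (pvBstep pfxT) (pl, ps, pd, cl, cd)).2.2.2.1).flatMap (· ++ ['\n']) := by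
  induction lines generalizing pl cl ps pd cd c with
  | nil => simp
  | cons line rest ih =>
    by_cases hin : PySem.Chars.isIn (PySem.Chars.stripChars line [' ']) pfxT = true
    · cases pd <;> cases cd <;>
        simpa [pvA1step, pvA2step, pvBstep, hin] using ih pl cl ps _ _ c hc
    · cases ps with
      | false =>
        have hc0 : c = 0 := by simpa using hc
        subst hc0
        cases pd with
        | true =>
          cases cd with
          | true =>
            simpa [pvA1step, pvA2step, pvBstep, pvBprogStep, pvBcandStep, hin,
                   List.flatMap_append, List.append_assoc] using
              ih pl cl false true true 0 (by simp)
          | false =>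
            simpa [pvA1step, pvA2step, pvBstep, pvBprogStep, pvBcandStep, hin,
                   List.flatMap_append, List.append_assoc] using
              ih pl (cl ++ [if PySem.Chars.startswith line "    ".toList then line
                            else "    ".toList ++ line]) false true
                (PySem.Chars.startswith (if PySem.Chars.startswith line "    ".toList then line
                            else "    ".toList ++ line) "    return ".toList) 0 (by simp)
        | false =>
          cases cd with
          | true =>
            simpa [pvA1step, pvA2step, pvBstep, pvBprogStep, pvBcandStep, hin,
                   List.flatMap_append, List.append_assoc] using
              ih (pl ++ [line]) cl true false true 1 (by simp)
          | false =>
            simpa [pvA1step, pvA2step, pvBstep, pvBprogStep, pvBcandStep, hin,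
                   List.flatMap_append, List.append_assoc] using
              ih (pl ++ [line])
                (cl ++ [if PySem.Chars.startswith line "    ".toList then line
                        else "    ".toList ++ line]) true false
                (PySem.Chars.startswith (if PySem.Chars.startswith line "    ".toList then line
                        else "    ".toList ++ line) "    return ".toList) 1 (by simp)
      | true =>
        have hcne : ¬ c = 0 := by simpa using hc
        cases pd with
        | true =>
          cases cd with
          | true =>
            simpa [pvA1step, pvA2step, pvBstep, pvBprogStep, pvBcandStep, hin, hcne,
                   List.flatMap_append, List.append_assoc] using
              ih pl cl true true true c hc
          | false =>
            simpa [pvA1step, pvA2step, pvBstep, pvBprogStep, pvBcandStep, hin, hcne,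
                   List.flatMap_append, List.append_assoc] using
              ih pl (cl ++ [if PySem.Chars.startswith line "    ".toList then line
                            else "    ".toList ++ line]) true true
                (PySem.Chars.startswith (if PySem.Chars.startswith line "    ".toList then line
                            else "    ".toList ++ line) "    return ".toList) c hc
        | false =>
          by_cases hsw : PySem.Chars.startswith line [' ', ' ', ' ', ' '] = true
          · by_cases hrt : PySem.Chars.startswith line [' ', ' ', ' ', ' ', 'r', 'e', 't', 'u', 'r', 'n', ' '] = true
            · cases cd with
              | true =>
                simpa [pvA1step, pvA2step, pvBstep, pvBprogStep, pvBcandStep, hin, hcne, hsw, hrt,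
                       List.flatMap_append, List.append_assoc] using
                  ih (pl ++ [line]) cl true true true c hc
              | false =>
                simpa [pvA1step, pvA2step, pvBstep, pvBprogStep, pvBcandStep, hin, hcne, hsw, hrt,
                       List.flatMap_append, List.append_assoc] using
                  ih (pl ++ [line]) (cl ++ [line]) true true true c hc
            · cases cd with
              | true =>
                simpa [pvA1step, pvA2step, pvBstep, pvBprogStep, pvBcandStep, hin, hcne, hsw, hrt,
                       List.flatMap_append, List.append_assoc] using
                  ih (pl ++ [line]) cl true false true (c + 1) (by simp)
              | false =>
                simpa [pvA1step, pvA2step, pvBstep, pvBprogStep, pvBcandStep, hin, hcne, hsw, hrt,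
                       List.flatMap_append, List.append_assoc] using
                  ih (pl ++ [line]) (cl ++ [line]) true false false (c + 1) (by simp)
          · cases cd with
            | true =>
              simpa [pvA1step, pvA2step, pvBstep, pvBprogStep, pvBcandStep, hin, hcne, hsw,
                     List.flatMap_append, List.append_assoc] using
                ih pl cl true true true c hc
            | false =>
              simpa [pvA1step, pvA2step, pvBstep, pvBprogStep, pvBcandStep, hin, hcne, hsw,
                     List.flatMap_append, List.append_assoc] using
                ih pl (cl ++ ["    ".toList ++ line]) true true
                  (PySem.Chars.startswith ("    ".toList ++ line) "    return ".toList) c hc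

-- ===== VERDICT (by name: the statement is the Claim_ definition above) =====
theorem synthesize_program_my_spec : Claim_equal_synthesize_program_my := by
  intro result prefix_ _
  unfold Spec_synthesize_program_my synthesize_program_my synthesize_program_my_alt
  have h := pv_fold_eq prefix_.toList (PySem.Chars.splitOn result.toList ['\n'])
      [] [] false false false 0 (by simp)
  simp only [List.flatMap_nil, List.append_nil] at h
  simp only [h.1, h.2, List.append_assoc]
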